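-- pv_equiv track=rewrite | github.com/mipopov/Y.Praktice | Sprint6/Solutions/TaskM.py | get_unique_dict
-- ===== SOURCE A (Python) =====
-- def get_unique_dict(string):
--     new_set = set()
--     result_str = ""
--     for i in range(len(string) - 1, -1, -1):
--         if string[i] in new_set:
--             continue
--         else:
--             result_str += string[i]
--             new_set.add(string[i])
--
--     return result_str
-- ===== SOURCE B (Python) =====
-- def get_unique_dict(string):
--     last = {}
--     for i, ch in enumerate(string):
--         last[ch] = i
--     items = sorted(last.items(), key=lambda kv: kv[1], reverse=True)
--     return "".join(ch for ch, _ in items)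
-- ===== Notes on version B (the rewrite author's own statement) =====
-- stated objective: alternative
-- what changed: Replaces A's backward membership-filtered scan with a forward pass building a char->last-index table, then emitting characters sorted by that index in descending order.
import Mathlib
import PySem

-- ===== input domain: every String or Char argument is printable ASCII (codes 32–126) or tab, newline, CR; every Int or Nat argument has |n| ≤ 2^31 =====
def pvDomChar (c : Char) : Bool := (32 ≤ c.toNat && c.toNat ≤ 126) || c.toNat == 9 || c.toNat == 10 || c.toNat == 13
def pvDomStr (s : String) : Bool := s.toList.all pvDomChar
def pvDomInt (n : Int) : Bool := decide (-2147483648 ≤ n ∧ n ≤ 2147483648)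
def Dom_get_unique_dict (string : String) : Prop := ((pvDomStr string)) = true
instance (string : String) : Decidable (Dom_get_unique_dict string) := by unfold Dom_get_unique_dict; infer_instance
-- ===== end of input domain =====

-- B replaces A's backward membership-filtered scan by a forward last-index table plus a
-- descending sort on that index (alternative algorithm, same result).

-- ===== PORT A =====
def get_unique_dict (string : String) : String :=
  let cs := string.toList
  let st := (PySem.List.pyRange (PySem.Str.len string - 1) (-1) (-1)).foldl
    (fun (acc : PySem.Set Char × List Char) i =>
      if acc.1.contains (PySem.List.pyGetD cs i ' ') then acc
      else (acc.1.add (PySem.List.pyGetD cs i ' '), acc.2 ++ [PySem.List.pyGetD cs i ' ']))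
    (PySem.Set.empty, [])
  String.ofList st.2

-- ===== PORT B =====
def get_unique_dict_alt (string : String) : String :=
  let last := (PySem.List.enumerate string.toList 0).foldl
    (fun (d : PySem.Dict Char Int) p => d.insert p.2 p.1) PySem.Dict.empty
  let items := PySem.List.sorted last.items (fun kv => kv.2) true
  String.ofList (items.map (fun kv => kv.1))

-- ===== PRECONDITION & SPEC =====
def Spec_get_unique_dict (string : String) (out : String) : Prop := out = get_unique_dict_alt string
instance (string : String) (out : String) : Decidable (Spec_get_unique_dict string out) := by unfold Spec_get_unique_dict; infer_instance

-- ===== CLAIM (what is proved, stated in full; the proofs are below) =====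
def Claim_equal_get_unique_dict : Prop := ∀ (string : String), Dom_get_unique_dict string → Spec_get_unique_dict string (get_unique_dict string)

-- ===== LEMMAS AND PROOFS =====

-- A's loop step on one character
def pvStepA (acc : PySem.Set Char × List Char) (c : Char) : PySem.Set Char × List Char :=
  if acc.1.contains c then acc else (acc.1.add c, acc.2 ++ [c])

-- last index of c in cs, as A/B both order by it
def pvLastIdx (cs : List Char) (c : Char) : Int :=
  (cs.length : Int) - 1 - (cs.reverse.idxOf c : Int)

-- A's loop is exactly "dedup keeping first occurrences, new elements appended"
theorem pvStepA_foldl (l : List Char) (s : PySem.Set Char) (r : List Char) :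
    l.foldl pvStepA (s, r)
      = (s.update l, r ++ (PySem.Set.ofList l).filter (fun c => !s.contains c)) := by
  induction l generalizing s r with
  | nil => simp [PySem.Set.update_nil, PySem.Set.ofList_nil]
  | cons c l ih =>
    rw [List.foldl_cons, PySem.Set.update_cons, PySem.Set.ofList_cons]
    by_cases hc : c ∈ s
    · have hcc : s.contains c = true := PySem.Set.contains_iff s c |>.2 hc
      rw [show pvStepA (s, r) c = (s, r) by simp [pvStepA, hcc, hc]]
      rw [ih, PySem.Set.add_of_mem hc]
      congr 1
      have : (PySem.Set.ofList l).discard c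
          = (PySem.Set.ofList l).filter (fun y => !(y == c)) := rfl
      rw [List.filter_cons, this, List.filter_filter]
      simp only [hcc, Bool.not_true, Bool.false_eq_true, if_neg, reduceIte]
      congr 1
      apply List.filter_congr
      intro y _
      by_cases hyc : y = c
      · subst hyc; rw [hcc]; simp
      · simp [hyc]
    · have hcc : s.contains c = false := by
        simp [PySem.Set.contains_eq_listContains] at *
        exact hc
      rw [show pvStepA (s, r) c = (s.add c, r ++ [c]) by simp [pvStepA, hcc, hc]]
      rw [ih]
      congr 1
      rw [List.filter_cons]
      simp only [hcc, Bool.not_false, if_pos, reduceIte]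
      rw [List.append_assoc]
      simp only [List.singleton_append]
      have hdisc : (PySem.Set.ofList l).discard c
          = (PySem.Set.ofList l).filter (fun y => !(y == c)) := rfl
      rw [hdisc, List.filter_filter]
      congr 1
      congr 1
      apply List.filter_congr
      intro y _
      rw [PySem.Set.add_of_not_mem hc]
      by_cases hyc : y = c
      · subst hyc; simp
      · simp [hyc, List.contains_append]

-- the dict built by B holds each character's last index
theorem pvDict_getD (cs : List Char) (c : Char) (hc : c ∈ cs) :
    ((PySem.List.enumerate cs 0).foldl (fun (d : PySem.Dict Char Int) p => d.insert p.2 p.1)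
        PySem.Dict.empty).getD c 0 = pvLastIdx cs c := by
  induction cs using List.reverseRecOn with
  | nil => simp at hc
  | append_singleton ys y ih =>
    rw [PySem.List.enumerate_append, List.foldl_append]
    rw [show PySem.List.enumerate [y] (0 + (ys.length : Int)) = [((ys.length : Int), y)] by
      simp [PySem.List.enumerate_cons, PySem.List.enumerate_nil]]
    simp only [List.foldl_cons, List.foldl_nil]
    by_cases hcy : c = y
    · subst hcy
      rw [PySem.Dict.getD_insert_self]
      simp [pvLastIdx, List.reverse_append]
    · rw [PySem.Dict.getD_insert_of_ne (hne := hcy)]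
      have hcys : c ∈ ys := by
        rcases List.mem_append.1 hc with h | h
        · exact h
        · simp at h; exact absurd h hcy
      rw [ih hcys]
      have hlt : ys.reverse.idxOf c < ys.reverse.length := List.idxOf_lt_length_of_mem (by simpa using hcys)
      simp only [pvLastIdx, List.reverse_append, List.reverse_singleton, List.singleton_append,
        List.length_append, List.length_singleton]
      rw [List.idxOf_cons_ne _ (by exact fun h => hcy (by simpa using h.symm))]
      push_cast
      omega

-- first-occurrence dedup is strictly increasing in first index
theorem pvPairwise_idxOf (l : List Char) :
    (PySem.Set.ofList l).Pairwise (fun a b => l.idxOf a < l.idxOf b) := by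
  induction l with
  | nil => simp [PySem.Set.ofList_nil]
  | cons x l ih =>
    rw [PySem.Set.ofList_cons]
    constructor
    · intro b hb
      have hbx : b ≠ x := by
        have := PySem.Set.mem_discard (s := PySem.Set.ofList l) (x := x) (y := b) |>.1 hb
        exact this.2
      rw [List.idxOf_cons_self, List.idxOf_cons_ne _ (by exact fun h => hbx (by simpa using h.symm))]
      omega
    · have hsub : ((PySem.Set.ofList l).discard x).Sublist (PySem.Set.ofList l) :=
        List.filter_sublist
      have hpw := (ih.sublist hsub)
      refine hpw.imp_of_mem ?_
      intro a b ha hb hab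
      have hax : a ≠ x := ((PySem.Set.mem_discard _ _ _).1 ha).2
      have hbx : b ≠ x := ((PySem.Set.mem_discard _ _ _).1 hb).2
      rw [List.idxOf_cons_ne _ (by exact fun h => hax (by simpa using h.symm)),
          List.idxOf_cons_ne _ (by exact fun h => hbx (by simpa using h.symm))]
      omega

-- A computes the first-occurrence dedup of the reversed character list
theorem pvA_eq (string : String) :
    get_unique_dict string = String.ofList (PySem.Set.ofList string.toList.reverse) := by
  have h0 : get_unique_dict string
      = String.ofList (((PySem.List.pyRange (PySem.Str.len string - 1) (-1) (-1)).foldl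
          (fun acc i => pvStepA acc (PySem.List.pyGetD string.toList i ' '))
          (PySem.Set.empty, [])).2) := rfl
  rw [h0, PySem.List.pyRange_neg_one_eq_reverse]
  have h2 : PySem.Str.len string - 1 + 1 = PySem.List.len string.toList := by
    simp [PySem.Str.len, PySem.List.len]
  have h3 : (-1 : Int) + 1 = 0 := by norm_num
  rw [h2, h3]
  rw [← List.foldl_map (f := fun i => PySem.List.pyGetD string.toList i ' ') (g := pvStepA)]
  rw [List.map_reverse, PySem.List.map_pyGetD_pyRange_zero]
  rw [pvStepA_foldl]
  simp [PySem.Set.contains_eq_listContains]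

-- B computes the items of the last-index table, ordered by descending index
theorem pvB_eq (string : String) :
    get_unique_dict_alt string = String.ofList (PySem.Set.ofList string.toList.reverse) := by
  set cs := string.toList with hcs
  set d := (PySem.List.enumerate cs 0).foldl
    (fun (d : PySem.Dict Char Int) p => d.insert p.2 p.1) PySem.Dict.empty with hd
  have h0 : get_unique_dict_alt string
      = String.ofList ((PySem.List.sorted d.items (fun kv => kv.2) true).map (fun kv => kv.1)) := rfl
  rw [h0]
  have hkeys : d.keys = PySem.Set.ofList cs := by
    rw [hd, PySem.Dict.keys_foldl_insert_key (PySem.List.enumerate cs 0) (fun p => p.2)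
      (fun d p => p.1) PySem.Dict.empty]
    simp [PySem.List.map_snd_enumerate, PySem.Set.update_nil_left]
  have hnd : d.keys.Nodup := by rw [hkeys]; exact PySem.Set.nodup_ofList cs
  have hitems : d.items = (PySem.Set.ofList cs).map (fun c => (c, pvLastIdx cs c)) := by
    rw [PySem.Dict.items_eq_map_keys d hnd 0, hkeys]
    apply List.map_congr_left
    intro k hk
    have : k ∈ cs := (PySem.Set.mem_ofList cs k).1 hk
    rw [hd, pvDict_getD cs k this]
  have hperm : ((PySem.Set.ofList cs.reverse).map (fun c => (c, pvLastIdx cs c))).Perm d.items := by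
    rw [hitems]
    apply List.Perm.map
    apply (List.perm_ext_iff_of_nodup (PySem.Set.nodup_ofList _) (PySem.Set.nodup_ofList _)).2
    intro x
    simp [PySem.Set.mem_ofList]
  have hpair : ((PySem.Set.ofList cs.reverse).map (fun c => (c, pvLastIdx cs c))).Pairwise
      (fun a b => (fun kv : Char × Int => kv.2) b < (fun kv : Char × Int => kv.2) a) := by
    rw [List.pairwise_map]
    refine (pvPairwise_idxOf cs.reverse).imp_of_mem ?_
    intro a b ha hb hab
    have hb' : b ∈ cs.reverse := (PySem.Set.mem_ofList _ _).1 hb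
    have hlt : cs.reverse.idxOf b < cs.reverse.length := List.idxOf_lt_length_of_mem hb'
    simp only [pvLastIdx]
    have : cs.reverse.length = cs.length := List.length_reverse
    omega
  rw [PySem.List.sorted_rev_eq_of_perm_of_pairwise_gt d.items
    ((PySem.Set.ofList cs.reverse).map (fun c => (c, pvLastIdx cs c))) _ hperm hpair]
  simp [List.map_map, Function.comp_def]

-- ===== VERDICT (by name: the statement is the Claim_ definition above) =====
theorem get_unique_dict_spec : Claim_equal_get_unique_dict := by
  intro string _
  unfold Spec_get_unique_dict
  rw [pvA_eq, pvB_eq]
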